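-- pv_equiv track=rewrite | github.com/niepenghai/redactor | config/patterns.py | is_balance_amount_optimized
-- ===== SOURCE A (Python) =====
-- _BALANCE_KEYWORDS = [
--     'beginning balance:', 'ending balance:', 'available balance:',
--     'current balance:', 'account balance:', 'total balance:',
--     'statement balance:', 'opening balance:', 'closing balance:',
--     'beginning balance ', 'ending balance ', 'available balance ',
--     'current balance ', 'account balance ', 'total balance ',
--     'statement balance ', 'opening balance ', 'closing balance ',
--     # Add keywords without colon/space for multi-line formats
--     'beginning balance', 'ending balance', 'available balance',
--     'current balance', 'account balance', 'total balance',
--     'statement balance', 'opening balance', 'closing balance'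
-- ]
--
-- def is_balance_amount_optimized(text: str, start_pos: int, full_text: str, full_text_lower: str) -> bool:
--     """
--     Optimized version of is_balance_amount that uses pre-lowercased text.
--     """
--     # Quick optimization: get smaller context first (50 chars instead of 200)
--     context_start = max(0, start_pos - 50)
--     before_context = full_text_lower[context_start:start_pos]
--
--     # Quick check with short context first
--     for keyword in _BALANCE_KEYWORDS:
--         if keyword in before_context:
--             return True
--
--     # Only do expensive line-based check if quick check failed
--     # Get current line context
--     line_start = full_text.rfind('\n', 0, start_pos) + 1
--
--     # Only check line if it's different from what we already checked
--     if line_start < context_start: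
--         line_context = full_text_lower[line_start:start_pos]
--         amount_pos_in_line = start_pos - line_start
--
--         for keyword in _BALANCE_KEYWORDS:
--             keyword_pos = line_context.find(keyword)
--             if keyword_pos != -1 and keyword_pos < amount_pos_in_line:
--                 return True
--
--     return False
-- ===== SOURCE B (Python) =====
-- _QUALIFIERS = ['beginning ', 'ending ', 'available ', 'current ', 'account ',
--                'total ', 'statement ', 'opening ', 'closing ']
--
-- def is_balance_amount_optimized(text: str, start_pos: int, full_text: str, full_text_lower: str) -> bool:
--     # Anchor-based scan: every balance keyword is "<qualifier> balance", optionally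
--     # followed by ':' or ' ' (which substring containment makes redundant).  Walk the
--     # merged context once and, at each position where 'balance' starts, check whether
--     # a qualifier word ends right there.
--     w = min(max(0, start_pos - 50), full_text.rfind('\n', 0, start_pos) + 1)
--     ctx = full_text_lower[w:start_pos]
--     for i in range(len(ctx)):
--         if ctx.startswith('balance', i) and any(ctx[:i].endswith(q) for q in _QUALIFIERS):
--             return True
--     return False
-- ===== Notes on version B (the rewrite author's own statement) =====
-- stated objective: alternative
-- what changed: A's 27 substring searches over two overlapping windows (50-char scan, then a guarded line-window find+position loop) are replaced by one anchor scan of the single merged window: walk it position by position and, where 'balance' starts, check whether one of the 9 qualifier words ends right there.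
import Mathlib
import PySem

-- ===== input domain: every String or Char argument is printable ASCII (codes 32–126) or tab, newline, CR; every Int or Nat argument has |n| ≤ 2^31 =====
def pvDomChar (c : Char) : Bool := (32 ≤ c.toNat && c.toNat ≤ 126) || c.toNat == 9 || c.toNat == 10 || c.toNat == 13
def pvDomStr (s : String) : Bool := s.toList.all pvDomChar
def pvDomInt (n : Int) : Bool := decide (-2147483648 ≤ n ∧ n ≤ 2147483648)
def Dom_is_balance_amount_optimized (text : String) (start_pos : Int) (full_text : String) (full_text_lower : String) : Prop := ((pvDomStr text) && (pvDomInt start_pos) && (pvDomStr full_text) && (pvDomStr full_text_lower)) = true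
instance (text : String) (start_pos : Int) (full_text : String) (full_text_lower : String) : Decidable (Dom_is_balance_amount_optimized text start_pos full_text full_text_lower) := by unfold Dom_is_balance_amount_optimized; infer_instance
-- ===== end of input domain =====

-- B replaces A's 27 substring searches over two windows by ONE anchor scan of the merged
-- window: at each position where "balance" starts, check whether a qualifier word ends
-- right there — objective: alternative (keyword list factored through its structure).

def pvBalanceKeywords : List String := [
  "beginning balance:", "ending balance:", "available balance:",
  "current balance:", "account balance:", "total balance:",
  "statement balance:", "opening balance:", "closing balance:",
  "beginning balance ", "ending balance ", "available balance ",
  "current balance ", "account balance ", "total balance ",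
  "statement balance ", "opening balance ", "closing balance ",
  "beginning balance", "ending balance", "available balance",
  "current balance", "account balance", "total balance",
  "statement balance", "opening balance", "closing balance"]

def pvQualifiers : List String := [
  "beginning ", "ending ", "available ", "current ", "account ",
  "total ", "statement ", "opening ", "closing "]

-- ===== PORT A =====
def is_balance_amount_optimized (text : String) (start_pos : Int) (full_text : String) (full_text_lower : String) : Bool :=
  let context_start : Int := max 0 (start_pos - 50)
  let before_context : String := PySem.Str.slice full_text_lower (some context_start) (some start_pos)
  -- first loop: early return True on a keyword hit in the short context
  if pvBalanceKeywords.any (fun keyword => PySem.Str.isIn keyword before_context) then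
    true
  else
    let line_start : Int := PySem.Str.rfindFrom full_text "\n" 0 (some start_pos) + 1
    if line_start < context_start then
      let line_context : String := PySem.Str.slice full_text_lower (some line_start) (some start_pos)
      let amount_pos_in_line : Int := start_pos - line_start
      -- second loop: find + position comparison
      pvBalanceKeywords.any (fun keyword =>
        let keyword_pos : Int := PySem.Str.find line_context keyword
        decide (keyword_pos ≠ -1) && decide (keyword_pos < amount_pos_in_line))
    else
      false

-- ===== PORT B =====
def is_balance_amount_optimized_alt (text : String) (start_pos : Int) (full_text : String) (full_text_lower : String) : Bool :=
  let w : Int := min (max 0 (start_pos - 50)) (PySem.Str.rfindFrom full_text "\n" 0 (some start_pos) + 1)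
  let ctx : List Char := (PySem.Str.slice full_text_lower (some w) (some start_pos)).toList
  -- for i in range(len(ctx)): ctx.startswith('balance', i) — with 0 ≤ i < len(ctx) this is
  -- exactly "'balance' is a prefix of ctx[i:]" — and any(ctx[:i].endswith(q) for q in _QUALIFIERS)
  (PySem.List.pyRange 0 (ctx.length : Int) 1).any (fun i =>
    PySem.Chars.startswith (ctx.drop i.toNat) "balance".toList
      && pvQualifiers.any (fun q => PySem.Chars.endswith (ctx.take i.toNat) q.toList))

-- ===== PRECONDITION & SPEC =====
def Spec_is_balance_amount_optimized (text : String) (start_pos : Int) (full_text : String) (full_text_lower : String) (out : Bool) : Prop := out = is_balance_amount_optimized_alt text start_pos full_text full_text_lower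
instance (text : String) (start_pos : Int) (full_text : String) (full_text_lower : String) (out : Bool) : Decidable (Spec_is_balance_amount_optimized text start_pos full_text full_text_lower out) := by unfold Spec_is_balance_amount_optimized; infer_instance

-- ===== CLAIM (what is proved, stated in full; the proofs are below) =====
def Claim_equal_is_balance_amount_optimized : Prop := ∀ (text : String) (start_pos : Int) (full_text : String) (full_text_lower : String), Dom_is_balance_amount_optimized text start_pos full_text full_text_lower → Spec_is_balance_amount_optimized text start_pos full_text full_text_lower (is_balance_amount_optimized text start_pos full_text full_text_lower)

-- ===== LEMMAS AND PROOFS =====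

-- rfind never returns less than -1
theorem pv_rfind_go_ge (s sub : List Char) (j : Nat) : -1 ≤ PySem.Chars.rfind.go s sub j := by
  induction j with
  | zero => simp [PySem.Chars.rfind.go]; split <;> omega
  | succ k ih => simp [PySem.Chars.rfind.go]; split <;> omega

theorem pv_rfind_ge (s sub : List Char) : -1 ≤ PySem.Chars.rfind s sub :=
  pv_rfind_go_ge s sub s.length

theorem pv_rfindFrom_aux (st e r : Int) (hst : 0 ≤ st) (hr : -1 ≤ r) :
    -1 ≤ if e < st then (-1 : Int) else if r = -1 then -1 else st + r := by
  split
  · omega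
  · split <;> omega

theorem pv_line_start_nonneg (ft : String) (sp : Int) :
    0 ≤ PySem.Str.rfindFrom ft "\n" 0 (some sp) + 1 := by
  have h : -1 ≤ PySem.Chars.rfindFrom ft.toList "\n".toList 0 (some sp) := by
    unfold PySem.Chars.rfindFrom
    exact pv_rfindFrom_aux _ _ _ (by norm_num) (pv_rfind_ge _ _)
  simp only [PySem.Str.rfindFrom_eq]
  omega

-- a keyword found in the 50-char window is found in any window that starts earlier
theorem pv_window_mono (s kw : List Char) (ls cs sp : Nat) (h1 : ls ≤ cs)
    (h : kw <:+: (s.drop cs).take (sp - cs)) : kw <:+: (s.drop ls).take (sp - ls) := by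
  have he : (s.drop cs).take (sp - cs) = ((s.drop ls).take (sp - ls)).drop (cs - ls) := by
    rw [List.drop_take, List.drop_drop]
    have h2 : ls + (cs - ls) = cs := by omega
    have h3 : sp - ls - (cs - ls) = sp - cs := by omega
    rw [h2, h3]
  rw [he] at h
  exact h.trans (List.drop_suffix _ _).isInfix

-- the second loop's per-keyword condition is plain membership when the window length
-- is bounded by amount_pos_in_line and the keyword is nonempty
theorem pv_find_cond (lc kw : List Char) (hk : kw ≠ []) (amount : Int)
    (hlen : (lc.length : Int) ≤ amount) :
    (decide (PySem.Chars.find lc kw ≠ -1) && decide (PySem.Chars.find lc kw < amount))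
      = PySem.Chars.isIn kw lc := by
  by_cases h : kw <:+: lc
  · have hf : 0 ≤ PySem.Chars.find lc kw := (PySem.Chars.find_nonneg_iff lc kw).mpr h
    have hspec := (PySem.Chars.find_spec (s := lc) (sub := kw) hf).1
    have hklen : kw.length ≤ (lc.drop (PySem.Chars.find lc kw).toNat).length :=
      hspec.length_le
    have hkpos : 0 < kw.length := List.length_pos_of_ne_nil hk
    have hlt : (PySem.Chars.find lc kw).toNat < lc.length := by
      simp only [List.length_drop] at hklen; omega
    have hin : PySem.Chars.isIn kw lc = true := (PySem.Chars.isIn_iff_infix kw lc).mpr h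
    rw [hin]
    have : PySem.Chars.find lc kw < amount := by omega
    simp [this]
    omega
  · have hf : PySem.Chars.find lc kw = -1 := (PySem.Chars.find_eq_neg_one_iff lc kw).mpr h
    have hin : PySem.Chars.isIn kw lc = false := (PySem.Chars.isIn_eq_false_iff kw lc).mpr h
    simp [hf, hin]

theorem pv_keywords_ne_nil : ∀ kw ∈ pvBalanceKeywords, kw.toList ≠ [] := by decide

-- A reduces to a single 27-keyword membership scan over the merged window
theorem pv_A_eq_merged (text : String) (sp : Int) (ft ftl : String) :
    is_balance_amount_optimized text sp ft ftl
      = pvBalanceKeywords.any (fun kw => PySem.Str.isIn kw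
          (PySem.Str.slice ftl
            (some (min (max 0 (sp - 50)) (PySem.Str.rfindFrom ft "\n" 0 (some sp) + 1)))
            (some sp))) := by
  unfold is_balance_amount_optimized
  simp only []
  set cs : Int := max 0 (sp - 50) with hcs_def
  set ls : Int := PySem.Str.rfindFrom ft "\n" 0 (some sp) + 1 with hls_def
  have h0ls : 0 ≤ ls := pv_line_start_nonneg ft sp
  have h0cs : 0 ≤ cs := le_max_left 0 (sp - 50)
  rcases lt_or_ge ls cs with hlt | hge
  · -- line window is strictly larger: both sides reduce to a scan of it
    rw [min_eq_right hlt.le, if_pos hlt]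
    have hcs_eq : cs = sp - 50 := by
      rcases max_choice 0 (sp - 50) with h | h <;> omega
    have h0sp : 0 ≤ sp := by omega
    have hlsn : ls.toNat ≤ cs.toNat := Int.toNat_le_toNat hlt.le
    split
    · rename_i h
      rw [List.any_eq_true] at h
      obtain ⟨kw, hmem, hin⟩ := h
      symm
      rw [List.any_eq_true]
      refine ⟨kw, hmem, ?_⟩
      rw [PySem.Str.isIn_eq, PySem.Str.toList_slice, PySem.Chars.slice_eq_listSlice] at hin ⊢
      rw [PySem.Chars.isIn_iff_infix] at hin ⊢
      rw [PySem.List.slice_toNat _ h0cs h0sp] at hin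
      rw [PySem.List.slice_toNat _ h0ls h0sp]
      exact pv_window_mono ftl.toList kw.toList ls.toNat cs.toNat sp.toNat hlsn hin
    · rename_i h
      refine PySem.List.any_congr_mem ?_
      intro kw hmem
      rw [PySem.Str.isIn_eq, PySem.Str.find_eq, PySem.Str.toList_slice,
        PySem.Chars.slice_eq_listSlice, PySem.List.slice_toNat _ h0ls h0sp]
      have hlen : ((List.take (sp.toNat - ls.toNat) (ftl.toList.drop ls.toNat)).length : Int)
          ≤ sp - ls := by
        have := List.length_take_le (sp.toNat - ls.toNat) (ftl.toList.drop ls.toNat)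
        omega
      exact pv_find_cond _ kw.toList (pv_keywords_ne_nil kw hmem) (sp - ls) hlen
  · -- same window on both sides
    rw [min_eq_left hge, if_neg (not_lt.mpr hge)]
    split
    · rename_i h; exact h.symm
    · rename_i h; simp only [Bool.not_eq_true] at h; exact h.symm

-- substring containment is antitone in the pattern
theorem pv_isIn_mono (a b s : List Char) (h : a <:+: b)
    (hb : PySem.Chars.isIn b s = true) : PySem.Chars.isIn a s = true := by
  rw [PySem.Chars.isIn_iff_infix] at hb ⊢
  exact h.trans hb

-- the 27-keyword scan equals the 9 bare "<qualifier>balance" keywords' scan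
theorem pv_any27_eq_bare (s : List Char) :
    pvBalanceKeywords.any (fun kw => PySem.Chars.isIn kw.toList s)
      = pvQualifiers.any (fun q => PySem.Chars.isIn (q.toList ++ "balance".toList) s) := by
  rw [Bool.eq_iff_iff]
  simp only [pvBalanceKeywords, pvQualifiers, List.any_cons, List.any_nil,
    Bool.or_false, Bool.or_eq_true]
  constructor
  · rintro (h|h|h|h|h|h|h|h|h|h|h|h|h|h|h|h|h|h|h|h|h|h|h|h|h|h|h) <;>
      first
        | exact Or.inl (pv_isIn_mono _ _ s (by decide) h)
        | exact Or.inr (Or.inl (pv_isIn_mono _ _ s (by decide) h))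
        | exact Or.inr (Or.inr (Or.inl (pv_isIn_mono _ _ s (by decide) h)))
        | exact Or.inr (Or.inr (Or.inr (Or.inl (pv_isIn_mono _ _ s (by decide) h))))
        | exact Or.inr (Or.inr (Or.inr (Or.inr (Or.inl (pv_isIn_mono _ _ s (by decide) h)))))
        | exact Or.inr (Or.inr (Or.inr (Or.inr (Or.inr (Or.inl (pv_isIn_mono _ _ s (by decide) h))))))
        | exact Or.inr (Or.inr (Or.inr (Or.inr (Or.inr (Or.inr (Or.inl (pv_isIn_mono _ _ s (by decide) h)))))))
        | exact Or.inr (Or.inr (Or.inr (Or.inr (Or.inr (Or.inr (Or.inr (Or.inl (pv_isIn_mono _ _ s (by decide) h))))))))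
        | exact Or.inr (Or.inr (Or.inr (Or.inr (Or.inr (Or.inr (Or.inr (Or.inr (pv_isIn_mono _ _ s (by decide) h))))))))
  · rintro (h|h|h|h|h|h|h|h|h)
    · exact .inr (.inr (.inr (.inr (.inr (.inr (.inr (.inr (.inr (.inr (.inr (.inr (.inr (.inr (.inr (.inr (.inr (.inr (.inl h))))))))))))))))))
    · exact .inr (.inr (.inr (.inr (.inr (.inr (.inr (.inr (.inr (.inr (.inr (.inr (.inr (.inr (.inr (.inr (.inr (.inr (.inr (.inl h)))))))))))))))))))
    · exact .inr (.inr (.inr (.inr (.inr (.inr (.inr (.inr (.inr (.inr (.inr (.inr (.inr (.inr (.inr (.inr (.inr (.inr (.inr (.inr (.inl h))))))))))))))))))))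
    · exact .inr (.inr (.inr (.inr (.inr (.inr (.inr (.inr (.inr (.inr (.inr (.inr (.inr (.inr (.inr (.inr (.inr (.inr (.inr (.inr (.inr (.inl h)))))))))))))))))))))
    · exact .inr (.inr (.inr (.inr (.inr (.inr (.inr (.inr (.inr (.inr (.inr (.inr (.inr (.inr (.inr (.inr (.inr (.inr (.inr (.inr (.inr (.inr (.inl h))))))))))))))))))))))
    · exact .inr (.inr (.inr (.inr (.inr (.inr (.inr (.inr (.inr (.inr (.inr (.inr (.inr (.inr (.inr (.inr (.inr (.inr (.inr (.inr (.inr (.inr (.inr (.inl h)))))))))))))))))))))))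
    · exact .inr (.inr (.inr (.inr (.inr (.inr (.inr (.inr (.inr (.inr (.inr (.inr (.inr (.inr (.inr (.inr (.inr (.inr (.inr (.inr (.inr (.inr (.inr (.inr (.inl h))))))))))))))))))))))))
    · exact .inr (.inr (.inr (.inr (.inr (.inr (.inr (.inr (.inr (.inr (.inr (.inr (.inr (.inr (.inr (.inr (.inr (.inr (.inr (.inr (.inr (.inr (.inr (.inr (.inr (.inl h)))))))))))))))))))))))))
    · exact .inr (.inr (.inr (.inr (.inr (.inr (.inr (.inr (.inr (.inr (.inr (.inr (.inr (.inr (.inr (.inr (.inr (.inr (.inr (.inr (.inr (.inr (.inr (.inr (.inr (.inr (h))))))))))))))))))))))))))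

-- q ++ b is a substring iff b starts at some position i with q ending at i
theorem pv_infix_append_iff (q b s : List Char) (hb : b ≠ []) :
    (q ++ b) <:+: s ↔ ∃ i, i < s.length ∧ b <+: s.drop i ∧ q <:+ s.take i := by
  constructor
  · rintro ⟨u, v, huv⟩
    refine ⟨u.length + q.length, ?_, ?_, ?_⟩
    · have : s.length = u.length + q.length + b.length + v.length := by
        subst huv; simp; omega
      have hbpos : 0 < b.length := List.length_pos_of_ne_nil hb
      omega
    · have : s.drop (u.length + q.length) = b ++ v := by
        subst huv
        rw [show u ++ (q ++ b) ++ v = (u ++ q) ++ (b ++ v) by simp,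
          show u.length + q.length = (u ++ q).length by simp, List.drop_left]
      rw [this]; exact List.prefix_append b v
    · have : s.take (u.length + q.length) = u ++ q := by
        subst huv
        rw [show u ++ (q ++ b) ++ v = (u ++ q) ++ (b ++ v) by simp,
          show u.length + q.length = (u ++ q).length by simp, List.take_left]
      rw [this]; exact List.suffix_append u q
  · rintro ⟨i, _, ⟨v, hv⟩, ⟨u, hu⟩⟩
    refine ⟨u, v, ?_⟩
    calc u ++ (q ++ b) ++ v = (u ++ q) ++ (b ++ v) := by simp
    _ = s.take i ++ s.drop i := by rw [hu, hv]
    _ = s := List.take_append_drop i s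

-- the 9-keyword scan equals B's anchored position scan
theorem pv_bare_eq_scan (s : List Char) :
    pvQualifiers.any (fun q => PySem.Chars.isIn (q.toList ++ "balance".toList) s)
      = (PySem.List.pyRange 0 (s.length : Int) 1).any (fun i =>
          PySem.Chars.startswith (s.drop i.toNat) "balance".toList
            && pvQualifiers.any (fun q => PySem.Chars.endswith (s.take i.toNat) q.toList)) := by
  rw [Bool.eq_iff_iff]
  simp only [List.any_eq_true, PySem.List.mem_pyRange_one, Bool.and_eq_true,
    PySem.Chars.isIn_iff_infix, PySem.Chars.startswith_iff, PySem.Chars.endswith_iff]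
  constructor
  · rintro ⟨q, hq, hinf⟩
    obtain ⟨i, hi, hbal, hsuf⟩ := (pv_infix_append_iff _ _ s (by decide)).mp hinf
    exact ⟨(i : Int), ⟨by omega, by exact_mod_cast hi⟩,
      by simpa using hbal, ⟨q, hq, by simpa using hsuf⟩⟩
  · rintro ⟨i, ⟨h0, hlt⟩, hbal, q, hq, hsuf⟩
    refine ⟨q, hq, (pv_infix_append_iff _ _ s (by decide)).mpr ⟨i.toNat, by omega, hbal, hsuf⟩⟩

-- ===== VERDICT (by name: the statement is the Claim_ definition above) =====
theorem is_balance_amount_optimized_spec : Claim_equal_is_balance_amount_optimized := by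
  intro text sp ft ftl _
  unfold Spec_is_balance_amount_optimized is_balance_amount_optimized_alt
  simp only []
  rw [pv_A_eq_merged]
  simp only [PySem.Str.isIn_eq]
  rw [pv_any27_eq_bare, pv_bare_eq_scan]
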